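-- pv_equiv track=rewrite | github.com/Sergio-Carulli/Patrones | Code/visualize_pattern/create_diagram.py | get_deep
-- ===== SOURCE A (Python) =====
-- def get_deep(line):
--     # Variable to store the line deep
--     deep = 0
--
--     # Iterate each character of the line
--     for char in line:
--
--         # Does the char represent ' '?
--         if char == ' ':
--             # This means there is a '|' ahead
--             continue
--
--         # Does the char represent '|'?
--         elif char == '|':
--             # Increase the line deep
--             deep += 1
--
--         else:
--             # In this case the term has been reached and the line deep has been calculated
--             break
--
--     # Return the line deep
--     return deep
-- ===== SOURCE B (Python) =====
-- import re
--
-- def get_deep(line):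
--     # Extract the leading run of spaces/pipes in one regex step, then count pipes.
--     return re.match(r'[ |]*', line).group().count('|')
-- ===== Notes on version B (the rewrite author's own statement) =====
-- stated objective: idiomatic
-- what changed: Replaces the accumulate-with-early-break character loop by extracting the leading [ |]* prefix with a regex and counting '|' in it as a separate pass.
import Mathlib
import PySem

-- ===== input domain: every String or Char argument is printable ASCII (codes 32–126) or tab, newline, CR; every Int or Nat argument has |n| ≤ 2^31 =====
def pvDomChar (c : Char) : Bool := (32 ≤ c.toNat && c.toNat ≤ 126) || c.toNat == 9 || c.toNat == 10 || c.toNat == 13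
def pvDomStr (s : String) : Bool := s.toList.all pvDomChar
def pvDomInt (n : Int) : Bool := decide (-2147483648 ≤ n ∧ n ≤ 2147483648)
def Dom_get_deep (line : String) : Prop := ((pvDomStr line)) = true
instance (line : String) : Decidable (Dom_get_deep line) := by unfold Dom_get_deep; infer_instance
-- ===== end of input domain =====

-- B extracts the leading run of ' '/'|' (the regex [ |]* prefix) and counts '|' in it,
-- instead of A's accumulate-with-early-break loop.

-- ===== PORT A =====
-- A's for-loop with `continue`/`break` and accumulator `deep`, as structural recursion.
def get_deep_loop (cs : List Char) (deep : Int) : Int :=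
  match cs with
  | [] => deep
  | c :: rest =>
    if c = ' ' then get_deep_loop rest deep
    else if c = '|' then get_deep_loop rest (deep + 1)
    else deep

def get_deep (line : String) : Int :=
  get_deep_loop line.toList 0

-- ===== PORT B =====
-- re.match(r'[ |]*', line).group() = leading takeWhile of space/pipe; then .count('|').
def get_deep_alt (line : String) : Int :=
  ((line.toList.takeWhile (fun c => c = ' ' || c = '|')).count '|' : Int)

-- ===== PRECONDITION & SPEC =====
def Spec_get_deep (line : String) (out : Int) : Prop := out = get_deep_alt line
instance (line : String) (out : Int) : Decidable (Spec_get_deep line out) := by unfold Spec_get_deep; infer_instance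

-- ===== CLAIM (what is proved, stated in full; the proofs are below) =====
def Claim_equal_get_deep : Prop := ∀ (line : String), Dom_get_deep line → Spec_get_deep line (get_deep line)

-- ===== LEMMAS AND PROOFS =====
theorem get_deep_loop_eq (cs : List Char) (deep : Int) :
    get_deep_loop cs deep =
      deep + ((cs.takeWhile (fun c => c = ' ' || c = '|')).count '|' : Int) := by
  induction cs generalizing deep with
  | nil => simp [get_deep_loop]
  | cons c rest ih =>
    by_cases hs : c = ' '
    · subst hs
      simp [get_deep_loop, List.takeWhile, ih]
    · by_cases hp : c = '|'
      · subst hp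
        simp [get_deep_loop, List.takeWhile, ih]
        ring
      · simp [get_deep_loop, List.takeWhile, hs, hp]

-- ===== VERDICT (by name: the statement is the Claim_ definition above) =====
theorem get_deep_spec : Claim_equal_get_deep := by
  intro line _
  unfold Spec_get_deep get_deep get_deep_alt
  simp [get_deep_loop_eq]
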